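-- pv_equiv track=rewrite | github.com/diogosm22/Project | Project/utils/excel_utils.py | sort_detections
-- ===== SOURCE A (Python) =====
-- def sort_detections(detections, margin_value):
--     # Sort detections by y1 (grouping values within the margin value)
--     sorted_by_y1 = sorted(detections, key=lambda x: x[1])
--
--     # Group y1 values within the margin value
--     grouped_detections = []
--     current_group = []
--     current_y1 = None
--
--     for det in sorted_by_y1:
--         if current_y1 is None or abs(det[1] - current_y1) <= margin_value:
--             current_group.append(det)
--         else:
--             # Sort the current group by x1
--             current_group.sort(key=lambda x: x[0])
--             grouped_detections.append(current_group)
--             current_group = [det]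
--         current_y1 = det[1]
--
--     # Add the last group
--     if current_group:
--         current_group.sort(key=lambda x: x[0])
--         grouped_detections.append(current_group)
--
--     return grouped_detections
-- ===== SOURCE B (Python) =====
-- def sort_detections(detections, margin_value):
--     # Label-then-partition decomposition: after the stable sort by y1, assign
--     # each element a group label by counting adjacent-pair breaks, then collect
--     # the groups by label and sort each by x1.
--     if not detections:
--         return []
--     s = sorted(detections, key=lambda d: d[1])
--     labels = [0]
--     last = 0
--     for prev, cur in zip(s, s[1:]):
--         if abs(cur[1] - prev[1]) > margin_value:
--             last += 1
--         labels.append(last)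
--     groups = [[d for l, d in zip(labels, s) if l == k] for k in range(last + 1)]
--     return [sorted(g, key=lambda d: d[0]) for g in groups]
-- ===== Notes on version B (the rewrite author's own statement) =====
-- stated objective: alternative
-- what changed: Replaces A's interleaved append-or-flush grouping loop (mutable current_group/current_y1 with in-place flushes) by a label-then-partition decomposition: one pass over adjacent pairs of the y-sorted list assigns each element a break-count label, groups are then collected by label and each sorted by x.
import Mathlib
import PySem

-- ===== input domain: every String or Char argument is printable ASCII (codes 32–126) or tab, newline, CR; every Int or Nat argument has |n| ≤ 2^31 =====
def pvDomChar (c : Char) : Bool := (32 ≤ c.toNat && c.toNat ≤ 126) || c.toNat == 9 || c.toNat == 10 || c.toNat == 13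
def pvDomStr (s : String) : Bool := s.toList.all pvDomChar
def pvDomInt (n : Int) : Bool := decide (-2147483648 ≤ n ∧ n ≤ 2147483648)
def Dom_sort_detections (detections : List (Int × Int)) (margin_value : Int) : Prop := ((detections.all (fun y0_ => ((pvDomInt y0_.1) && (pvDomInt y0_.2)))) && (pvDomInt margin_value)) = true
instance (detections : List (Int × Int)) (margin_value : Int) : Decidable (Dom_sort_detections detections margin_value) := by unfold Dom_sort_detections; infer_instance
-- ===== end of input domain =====

-- B replaces A's interleaved append-or-flush loop with a label-then-partition
-- decomposition (count adjacent y-gap breaks, then collect groups by label);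
-- objective: alternative structure, same observable result.

-- ===== PORT A =====
-- sort each group by x1 (sorted(g, key=lambda x: x[0]))
def pvSortX (g : List (Int × Int)) : List (Int × Int) :=
  PySem.List.sorted g (fun x => x.1)

-- one iteration of A's for-loop over (grouped_detections, current_group, current_y1)
def pvAStep (m : Int) (st : List (List (Int × Int)) × List (Int × Int) × Option Int)
    (det : Int × Int) : List (List (Int × Int)) × List (Int × Int) × Option Int :=
  match st.2.2 with
  | none => (st.1, st.2.1 ++ [det], some det.2)
  | some y =>
    if |det.2 - y| ≤ m then (st.1, st.2.1 ++ [det], some det.2)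
    else (st.1 ++ [pvSortX st.2.1], [det], some det.2)

def sort_detections (detections : List (Int × Int)) (margin_value : Int) : List (List (Int × Int)) :=
  let sorted_by_y1 := PySem.List.sorted detections (fun x => x.2)
  let st := sorted_by_y1.foldl (pvAStep margin_value) ([], [], none)
  if st.2.1 ≠ [] then st.1 ++ [pvSortX st.2.1] else st.1

-- ===== PORT B =====
-- one iteration of B's label loop over (labels, last)
def pvBStep (m : Int) (st : List Int × Int) (pc : (Int × Int) × (Int × Int)) : List Int × Int :=
  let last' := if |pc.2.2 - pc.1.2| > m then st.2 + 1 else st.2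
  (st.1 ++ [last'], last')

def sort_detections_alt (detections : List (Int × Int)) (margin_value : Int) : List (List (Int × Int)) :=
  if detections = [] then []
  else
    let s := PySem.List.sorted detections (fun d => d.2)
    let lf := (s.zip s.tail).foldl (pvBStep margin_value) ([(0 : Int)], 0)
    let groups := (PySem.List.pyRange 0 (lf.2 + 1) 1).map
      (fun k => ((lf.1.zip s).filter (fun p => p.1 == k)).map (fun p => p.2))
    groups.map (fun g => PySem.List.sorted g (fun d => d.1))

-- ===== PRECONDITION & SPEC =====
def Spec_sort_detections (detections : List (Int × Int)) (margin_value : Int) (out : List (List (Int × Int))) : Prop := out = sort_detections_alt detections margin_value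
instance (detections : List (Int × Int)) (margin_value : Int) (out : List (List (Int × Int))) : Decidable (Spec_sort_detections detections margin_value out) := by unfold Spec_sort_detections; infer_instance

-- ===== CLAIM (what is proved, stated in full; the proofs are below) =====
def Claim_equal_sort_detections : Prop := ∀ (detections : List (Int × Int)) (margin_value : Int), Dom_sort_detections detections margin_value → Spec_sort_detections detections margin_value (sort_detections detections margin_value)

-- ===== LEMMAS AND PROOFS =====

-- canonical chaining chunker: groups of the y-sorted list, before the x-sorts
def pvChunk (m : Int) (cur : List (Int × Int)) (y : Int) : List (Int × Int) → List (List (Int × Int))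
  | [] => [cur]
  | d :: rest => if |d.2 - y| ≤ m then pvChunk m (cur ++ [d]) d.2 rest else cur :: pvChunk m [d] d.2 rest

-- labelled tail sequence: each element with its group label, starting from label k after y
def pvLab (m : Int) (k : Int) (y : Int) : List (Int × Int) → List (Int × (Int × Int))
  | [] => []
  | d :: rest =>
    let k' := if |d.2 - y| > m then k + 1 else k
    (k', d) :: pvLab m k' d.2 rest

-- number of breaks in the chain starting after y
def pvNB (m : Int) (y : Int) : List (Int × Int) → Int
  | [] => 0
  | d :: rest => (if |d.2 - y| > m then 1 else 0) + pvNB m d.2 rest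

-- A's finalization step
def pvFinA (st : List (List (Int × Int)) × List (Int × Int) × Option Int) : List (List (Int × Int)) :=
  if st.2.1 ≠ [] then st.1 ++ [pvSortX st.2.1] else st.1

theorem pvNB_nonneg (m y : Int) (l : List (Int × Int)) : 0 ≤ pvNB m y l := by
  induction l generalizing y with
  | nil => simp [pvNB]
  | cons d rest ih => simp only [pvNB]; have := ih d.2; split <;> omega

theorem pvLab_ge (m k y : Int) (l : List (Int × Int)) :
    ∀ p ∈ pvLab m k y l, k ≤ p.1 := by
  induction l generalizing k y with
  | nil => simp [pvLab]
  | cons d rest ih =>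
    intro p hp
    simp only [pvLab, List.mem_cons] at hp
    rcases hp with h | h
    · subst h; dsimp only; split <;> omega
    · have := ih (if |d.2 - y| > m then k + 1 else k) d.2 p h
      split_ifs at this <;> omega

-- the labels zipped back with the tail give the labelled sequence
theorem pvZipLab (m k y : Int) (l : List (Int × Int)) :
    ((pvLab m k y l).map (fun q => q.1)).zip l = pvLab m k y l := by
  induction l generalizing k y with
  | nil => simp [pvLab]
  | cons d rest ih => simp [pvLab, ih]

-- A's fold computes the chunks, x-sorted
theorem pvFoldA (m : Int) (l : List (Int × Int)) :
    ∀ (g : List (List (Int × Int))) (cur : List (Int × Int)) (y : Int), cur ≠ [] →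
    pvFinA (l.foldl (pvAStep m) (g, cur, some y)) = g ++ (pvChunk m cur y l).map pvSortX := by
  induction l with
  | nil => intro g cur y hc; simp [pvFinA, pvChunk, hc]
  | cons d rest ih =>
    intro g cur y hc
    rw [List.foldl_cons]
    by_cases h : |d.2 - y| ≤ m
    · rw [show pvAStep m (g, cur, some y) d = (g, cur ++ [d], some d.2) from by simp [pvAStep, h]]
      rw [ih g (cur ++ [d]) d.2 (by simp)]
      rw [show pvChunk m cur y (d :: rest) = pvChunk m (cur ++ [d]) d.2 rest from by simp [pvChunk, h]]
    · rw [show pvAStep m (g, cur, some y) d = (g ++ [pvSortX cur], [d], some d.2) from by simp [pvAStep, h]]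
      rw [ih (g ++ [pvSortX cur]) [d] d.2 (by simp)]
      rw [show pvChunk m cur y (d :: rest) = cur :: pvChunk m [d] d.2 rest from by simp [pvChunk, h]]
      simp

-- B's label fold
theorem pvFoldB (m : Int) (l : List (Int × Int)) :
    ∀ (p : Int × Int) (acc : List Int) (k : Int),
    ((p :: l).zip l).foldl (pvBStep m) (acc, k)
      = (acc ++ (pvLab m k p.2 l).map (fun q => q.1), k + pvNB m p.2 l) := by
  induction l with
  | nil => intro p acc k; simp [pvLab, pvNB]
  | cons c l' ih =>
    intro p acc k
    simp only [List.zip_cons_cons, List.foldl_cons, pvBStep]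
    by_cases h : |c.2 - p.2| > m
    · rw [if_pos h, ih c (acc ++ [k + 1]) (k + 1)]
      simp only [pvLab, pvNB, if_pos h, List.map_cons, Prod.mk.injEq]
      exact ⟨by simp, by omega⟩
    · rw [if_neg h, ih c (acc ++ [k]) k]
      simp only [pvLab, pvNB, if_neg h, List.map_cons, Prod.mk.injEq]
      exact ⟨by simp, by omega⟩

-- the structural bridge: chunks = partition of the labelled sequence by label
theorem pvChunkStr (m : Int) (l : List (Int × Int)) :
    ∀ (y k : Int) (cur : List (Int × Int)),
    pvChunk m cur y l
      = (cur ++ ((pvLab m k y l).filter (fun p => p.1 == k)).map (fun p => p.2))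
        :: (PySem.List.pyRange (k + 1) (k + 1 + pvNB m y l) 1).map
            (fun j => ((pvLab m k y l).filter (fun p => p.1 == j)).map (fun p => p.2)) := by
  induction l with
  | nil =>
    intro y k cur
    simp [pvChunk, pvLab, pvNB]
  | cons d rest ih =>
    intro y k cur
    by_cases h : |d.2 - y| ≤ m
    · have h' : ¬ (|d.2 - y| > m) := by omega
      simp only [pvChunk, pvLab, pvNB, if_pos h, if_neg h', zero_add]
      rw [ih d.2 k (cur ++ [d])]
      congr 1
      · simp
      · apply List.map_congr_left
        intro j hj
        have hj' : k + 1 ≤ j := (PySem.List.mem_pyRange_one.mp hj).1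
        have hne : (k == j) = false := by simp; omega
        simp [hne]
    · have h' : |d.2 - y| > m := by omega
      simp only [pvChunk, pvLab, pvNB, if_neg h, if_pos h']
      rw [ih d.2 (k + 1) [d]]
      have hnb := pvNB_nonneg m d.2 rest
      rw [show k + 1 + (1 + pvNB m d.2 rest) = k + 2 + pvNB m d.2 rest from by ring]
      rw [PySem.List.pyRange_one_cons (by omega : (k + 1 : Int) < k + 2 + pvNB m d.2 rest)]
      rw [show (k + 1 + 1 : Int) = k + 2 from by ring]
      have hfk : (((k + 1, d) :: pvLab m (k + 1) d.2 rest).filter (fun p => p.1 == k)) = [] := by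
        rw [List.filter_eq_nil_iff]
        intro p hp
        rcases List.mem_cons.mp hp with hh | ht
        · subst hh; simp
        · have := pvLab_ge m (k + 1) d.2 rest p ht
          simp; omega
      rw [hfk]
      simp only [List.map_cons, List.map_nil, List.append_nil]
      congr 1
      congr 1
      · simp
      · apply List.map_congr_left
        intro j hj
        have hj' : k + 2 ≤ j := (PySem.List.mem_pyRange_one.mp hj).1
        have hne : ((k + 1 : Int) == j) = false := by simp; omega
        simp [hne]

-- ===== VERDICT (by name: the statement is the Claim_ definition above) =====
theorem sort_detections_spec : Claim_equal_sort_detections := by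
  intro dets m _
  unfold Spec_sort_detections
  by_cases hd : dets = []
  · subst hd; rfl
  · have hs : PySem.List.sorted dets (fun d : Int × Int => d.2) ≠ [] := by
      simp [PySem.List.sorted_eq_nil_iff, hd]
    obtain ⟨d0, rest, hsr⟩ := List.exists_cons_of_ne_nil hs
    -- A side
    have hA : sort_detections dets m = (pvChunk m [d0] d0.2 rest).map pvSortX := by
      show pvFinA ((PySem.List.sorted dets (fun x : Int × Int => x.2)).foldl (pvAStep m) ([], [], none))
          = (pvChunk m [d0] d0.2 rest).map pvSortX
      rw [hsr]
      simp only [List.foldl_cons, pvAStep, List.nil_append]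
      rw [pvFoldA m rest [] [d0] d0.2 (by simp)]
      simp
    -- B side
    have hB : sort_detections_alt dets m = (pvChunk m [d0] d0.2 rest).map pvSortX := by
      unfold sort_detections_alt
      rw [if_neg hd]
      simp only [hsr]
      rw [show ((d0 :: rest).zip (d0 :: rest).tail) = ((d0 :: rest).zip rest) from rfl]
      rw [pvFoldB m rest d0 [(0 : Int)] 0]
      have hzip : (((0 : Int) :: (pvLab m 0 d0.2 rest).map (fun q => q.1)).zip (d0 :: rest))
          = (0, d0) :: pvLab m 0 d0.2 rest := by
        simp [List.zip_cons_cons, pvZipLab]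
      have hnb := pvNB_nonneg m d0.2 rest
      have hrange : PySem.List.pyRange 0 (0 + pvNB m d0.2 rest + 1) 1
          = (0 : Int) :: PySem.List.pyRange 1 (1 + pvNB m d0.2 rest) 1 := by
        rw [show (0 : Int) + pvNB m d0.2 rest + 1 = 1 + pvNB m d0.2 rest from by ring]
        rw [PySem.List.pyRange_one_cons (by omega : (0 : Int) < 1 + pvNB m d0.2 rest)]
        norm_num
      simp only [List.cons_append, List.nil_append, hzip, hrange]
      rw [pvChunkStr m rest d0.2 0 [d0]]
      simp only [List.map_cons, List.map_map, zero_add]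
      congr 1
      apply List.map_congr_left
      intro j hj
      have hj1 : (1 : Int) ≤ j := (PySem.List.mem_pyRange_one.mp hj).1
      have hne : ¬ ((0 : Int) = j) := by omega
      simp [pvSortX, hne]
    rw [hA, hB]
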